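-- pv_equiv track=rewrite | github.com/nmichlo/mtg-dataset | examples/util/iter.py | is_last_iter
-- ===== SOURCE A (Python) =====
-- from collections import deque
--
-- def is_last_iter(items, n=1):
--     iterator = iter(items)
--     # lookahead stack
--     prev = deque()
--     # add items to prev
--     assert n >= 0
--     for i in range(n):
--         try:
--             prev.append(next(iterator))
--         except StopIteration:
--             break
--     # check if there are next items and replace the current item
--     while len(prev) >= n:
--         # get the next item
--         try:
--             prev.append(next(iterator))
--         except StopIteration:
--             break
--         # done
--         yield False, prev.popleft()
--     # return the remaining items
--     yield from ((True, p) for p in prev)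
-- ===== SOURCE B (Python) =====
-- def is_last_iter(items, n=1):
--     assert n >= 0
--     lst = list(items)
--     L = len(lst)
--     for i, item in enumerate(lst):
--         yield (i >= L - n, item)
-- ===== Notes on version B (the rewrite author's own statement) =====
-- stated objective: simpler
-- what changed: Replaces the bounded-deque sliding-window lookahead with materializing the iterable once and yielding (i >= len - n, item) by index comparison.
import Mathlib
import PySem

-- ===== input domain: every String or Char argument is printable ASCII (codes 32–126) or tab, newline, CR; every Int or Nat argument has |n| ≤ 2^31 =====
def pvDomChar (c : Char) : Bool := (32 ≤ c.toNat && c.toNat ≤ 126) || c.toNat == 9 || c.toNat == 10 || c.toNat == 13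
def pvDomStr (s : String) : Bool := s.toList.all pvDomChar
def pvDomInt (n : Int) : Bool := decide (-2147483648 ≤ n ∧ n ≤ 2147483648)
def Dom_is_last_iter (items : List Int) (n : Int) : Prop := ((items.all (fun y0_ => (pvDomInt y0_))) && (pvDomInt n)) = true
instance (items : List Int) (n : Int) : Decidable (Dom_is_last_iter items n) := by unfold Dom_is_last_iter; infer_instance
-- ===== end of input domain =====

-- B materializes the input once and flags by index comparison, replacing A's bounded-deque
-- sliding window; equivalence of return values is proved for all finite inputs with n ≥ 0.

-- ===== PORT A =====
-- the while-loop of A: queue `prev`, remaining iterator `rest`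
def pvLoopA (n : Nat) (prev rest : List Int) : List (Bool × Int) :=
  if n ≤ prev.length then
    match rest with
    | [] => prev.map (fun p => (true, p))               -- StopIteration: yield from prev as True
    | x :: rs =>
      let prev' := prev ++ [x]                           -- prev.append(next(iterator))
      (false, prev'.headI) :: pvLoopA n prev'.tail rs    -- yield False, prev.popleft()
  else prev.map (fun p => (true, p))                     -- yield from prev as True

def is_last_iter (items : List Int) (n : Int) : List (Bool × Int) :=
  if n < 0 then []                                       -- assert n >= 0 raises: outside Pre_
  else
    -- for i in range(n): prev.append(next(iterator)), breaking on StopIteration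
    pvLoopA n.toNat (items.take n.toNat) (items.drop n.toNat)

-- ===== PORT B =====
def is_last_iter_alt (items : List Int) (n : Int) : List (Bool × Int) :=
  let L : Int := items.length
  (PySem.List.enumerate items 0).map (fun p => (decide (p.1 ≥ L - n), p.2))

-- ===== PRECONDITION & SPEC =====
-- A raises AssertionError for n < 0; Pre_ excludes exactly those inputs.
def Pre_is_last_iter (items : List Int) (n : Int) : Prop := 0 ≤ n
instance (items : List Int) (n : Int) : Decidable (Pre_is_last_iter items n) := by unfold Pre_is_last_iter; infer_instance
def pvWitness_is_last_iter : List Int × Int := ([1, 2, 3], 2)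

def Spec_is_last_iter (items : List Int) (n : Int) (out : List (Bool × Int)) : Prop := out = is_last_iter_alt items n
instance (items : List Int) (n : Int) (out : List (Bool × Int)) : Decidable (Spec_is_last_iter items n out) := by unfold Spec_is_last_iter; infer_instance

-- ===== CLAIM (what is proved, stated in full; the proofs are below) =====
def Claim_equal_is_last_iter : Prop := ∀ (items : List Int) (n : Int), Dom_is_last_iter items n → Pre_is_last_iter items n → Spec_is_last_iter items n (is_last_iter items n)

-- ===== LEMMAS AND PROOFS =====

-- when the threshold is ≤ the starting index, every flag is true
lemma pvEnumAllTrue (xs : List Int) (s T : Int) (h : T ≤ s) :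
    (PySem.List.enumerate xs s).map (fun p => (decide (p.1 ≥ T), p.2)) = xs.map (fun x => (true, x)) := by
  induction xs generalizing s with
  | nil => simp [PySem.List.enumerate_nil]
  | cons x xs ih =>
    simp only [PySem.List.enumerate_cons, List.map_cons]
    rw [ih (s + 1) (by omega)]
    simp [ge_iff_le, h]

-- the while-loop, with the queue exactly full, flags the first rest.length of prev ++ rest false
lemma pvLoopA_eq (n : Nat) (rest : List Int) : ∀ (prev : List Int) (s : Int), prev.length = n →
    pvLoopA n prev rest =
      (PySem.List.enumerate (prev ++ rest) s).map
        (fun p => (decide (p.1 ≥ s + (rest.length : Int)), p.2)) := by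
  induction rest with
  | nil =>
    intro prev s hlen
    simp only [pvLoopA, List.append_nil, List.length_nil, Nat.cast_zero, add_zero]
    rw [pvEnumAllTrue prev s s le_rfl]
    split <;> rfl
  | cons x rs ih =>
    intro prev s hlen
    rw [pvLoopA]
    rw [if_pos (by omega)]
    obtain ⟨q, qs, hq⟩ : ∃ q qs, prev ++ [x] = q :: qs := by
      cases h : prev ++ [x] with
      | nil => exact absurd h (by simp)
      | cons a b => exact ⟨a, b, rfl⟩
    have hqs : qs.length = n := by
      have := congrArg List.length hq
      simp at this; omega
    simp only [hq, List.headI, List.tail]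
    rw [ih qs (s + 1) hqs]
    have hl : prev ++ x :: rs = q :: (qs ++ rs) := by
      rw [← List.singleton_append, ← List.append_assoc, hq]; simp
    rw [hl, PySem.List.enumerate_cons, List.map_cons]
    have hhead : (decide (s ≥ s + ((x :: rs).length : Int)) : Bool) = false := by
      simp only [List.length_cons]
      push_cast
      simp only [ge_iff_le, decide_eq_false_iff_not]
      omega
    rw [hhead]
    congr 1
    apply List.map_congr_left
    intro p _
    have : s + 1 + (rs.length : Int) = s + ((x :: rs).length : Int) := by
      simp only [List.length_cons]; push_cast; ring
    rw [this]

-- ===== VERDICT (by name: the statement is the Claim_ definition above) =====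
theorem is_last_iter_spec : Claim_equal_is_last_iter := by
  intro items n _ hpre
  unfold Pre_is_last_iter at hpre
  unfold Spec_is_last_iter is_last_iter is_last_iter_alt
  rw [if_neg (by omega)]
  by_cases hk : n.toNat ≤ items.length
  · rw [pvLoopA_eq n.toNat (items.drop n.toNat) (items.take n.toNat) 0
      (by rw [List.length_take]; omega)]
    rw [List.take_append_drop]
    congr 1
    funext p
    have : (0 : Int) + ((items.drop n.toNat).length : Int) = (items.length : Int) - n := by
      rw [List.length_drop, Nat.cast_sub hk]; omega
    rw [this]
  · have htake : items.take n.toNat = items := List.take_of_length_le (by omega)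
    have hdrop : items.drop n.toNat = [] := List.drop_of_length_le (by omega)
    rw [htake, hdrop]
    have : pvLoopA n.toNat items [] = items.map (fun x => (true, x)) := by
      unfold pvLoopA; split <;> rfl
    rw [this, pvEnumAllTrue items 0 ((items.length : Int) - n) (by omega)]
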